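-- pv_equiv track=rewrite | github.com/pypi-data/pypi-mirror-31 | packages/kopi/kopi-0.18.5.tar.gz/kopi-0.18.5/kopi/Bak_mycson.py | ScanForQuotPair
-- ===== SOURCE A (Python) =====
-- def ScanForHowManyEscapeBefore(x, j):
-- 	#The the value is even, then \..\\" is a valid Open/Close quot
-- 	#If the result is odd, then \..\" is not a valid quot
-- 	n = 0
-- 	while x[j-n] =="\\":
-- 		n += 1
-- 	return n
--
-- def ScanForQuotPair(x):
-- 	# e.g. xxx"xxx"yy"yy"
-- 	# return [[3,7],[10,13]]
-- 	R = []
-- 	r = []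
-- 	n = x.find("\"")
-- 	while n != -1 :
-- 		if ScanForHowManyEscapeBefore(x,n)%2 == 0:
-- 			r += [n]
-- 			if len(r) == 2:
-- 				R += [r]
-- 				r = []
-- 		n += 1
-- 		n = x.find("\"", n)
--
-- 	# If successful, r should be []
-- 	if len(r) != 0 :
-- 		print ("String Error: Number of Quotation Mark Not Correct")
-- 		return []
-- 	return R
-- ===== SOURCE B (Python) =====
-- def _pairs(positions):
--     if not positions:
--         return []
--     return [[positions[0], positions[1]]] + _pairs(positions[2:])
--
-- def ScanForQuotPair(x):
--     positions = [i for i, c in enumerate(x) if c == '"']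
--     if len(positions) % 2 == 1:
--         print("String Error: Number of Quotation Mark Not Correct")
--         return []
--     return _pairs(positions)
-- ===== Notes on version B (the rewrite author's own statement) =====
-- stated objective: simpler
-- what changed: Replaces the repeated str.find loop with its incremental r/R pair accumulators and the dead escape-counting helper (which provably always returns 0 because it inspects the quote character itself first) by a single comprehension collecting all quote positions, an up-front parity check, and a small recursive pairing helper.
import Mathlib
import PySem

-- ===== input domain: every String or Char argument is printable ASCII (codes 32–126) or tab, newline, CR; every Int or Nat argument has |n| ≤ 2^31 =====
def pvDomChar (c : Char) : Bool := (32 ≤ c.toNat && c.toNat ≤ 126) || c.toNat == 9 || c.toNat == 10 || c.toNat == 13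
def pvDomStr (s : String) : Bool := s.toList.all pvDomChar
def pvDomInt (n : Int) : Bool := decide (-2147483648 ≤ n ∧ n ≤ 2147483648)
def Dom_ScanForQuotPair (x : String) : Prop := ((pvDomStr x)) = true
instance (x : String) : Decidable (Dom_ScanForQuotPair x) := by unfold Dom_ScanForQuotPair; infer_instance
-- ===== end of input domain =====

-- B replaces A's repeated str.find loop with incremental pair accumulators (and its dead
-- escape-counting helper) by one comprehension collecting quote positions, a parity check,
-- and a recursive pairing helper; equivalence of RETURN values is proved (the odd-count
-- print side effect is identical in both Pythons and not modelled).


-- ===== PORT A =====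
-- while x[j-n] == "\\": n += 1   — ported with fuel; the fuel-0 and IndexError (none)
-- branches are unreachable at A's call sites, where x[j] is always '"'.
def scanEscGo (x : List Char) (j : Int) (n : Int) : Nat → Int
  | 0 => n
  | fuel + 1 =>
    match PySem.List.pyGet? x (j - n) with
    | some c => if c = '\\' then scanEscGo x j (n + 1) fuel else n
    | none => n

def ScanForHowManyEscapeBefore (x : List Char) (j : Int) : Int :=
  scanEscGo x j 0 (x.length + j.natAbs + 2)

-- the while loop of ScanForQuotPair; fuel x.length + 1 suffices (n strictly increases)
def scanLoop (x : List Char) (n : Int) (r : List Int) (R : List (List Int)) :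
    Nat → List Int × List (List Int)
  | 0 => (r, R)
  | fuel + 1 =>
    if n ≠ -1 then
      let next := PySem.Chars.findFrom x ['"'] (n + 1) none
      if PySem.Int.mod (ScanForHowManyEscapeBefore x n) 2 = 0 then
        let r' := r ++ [n]
        if r'.length = 2 then scanLoop x next [] (R ++ [r']) fuel
        else scanLoop x next r' R fuel
      else scanLoop x next r R fuel
    else (r, R)

def ScanForQuotPair (x : String) : List (List Int) :=
  let cs := x.toList
  let (r, R) := scanLoop cs (PySem.Chars.find cs ['"']) [] [] (cs.length + 1)
  if r.length ≠ 0 then [] else R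

-- ===== PORT B =====
-- _pairs(positions): [[p0,p1]] + _pairs(rest); the [] branch also covers a singleton,
-- which B never reaches (it pairs only even-length lists).
def pyPairs : List Int → List (List Int)
  | a :: b :: rest => [a, b] :: pyPairs rest
  | _ => []

def ScanForQuotPair_alt (x : String) : List (List Int) :=
  let positions := ((PySem.List.enumerate x.toList 0).filter (fun p => p.2 == '"')).map (·.1)
  if PySem.Int.mod (PySem.List.len positions) 2 = 1 then [] else pyPairs positions

-- ===== PRECONDITION & SPEC =====
def Spec_ScanForQuotPair (x : String) (out : List (List Int)) : Prop := out = ScanForQuotPair_alt x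
instance (x : String) (out : List (List Int)) : Decidable (Spec_ScanForQuotPair x out) := by unfold Spec_ScanForQuotPair; infer_instance

-- ===== CLAIM (what is proved, stated in full; the proofs are below) =====
def Claim_equal_ScanForQuotPair : Prop := ∀ (x : String), Dom_ScanForQuotPair x → Spec_ScanForQuotPair x (ScanForQuotPair x)

-- ===== LEMMAS AND PROOFS =====

-- qpos cs k: the positions of '"' in cs, numbered from k (proof-side characterisation)
def qpos : List Char → Int → List Int
  | [], _ => []
  | h :: t, k => if h = '"' then k :: qpos t (k + 1) else qpos t (k + 1)

theorem qpos_shift (xs : List Char) (k d : Int) :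
    qpos xs (k + d) = (qpos xs k).map (· + d) := by
  induction xs generalizing k with
  | nil => simp [qpos]
  | cons h t ih =>
    by_cases hq : h = '"' <;>
      simp [qpos, hq, show k + d + 1 = (k + 1) + d by ring, ih (k + 1)]

theorem qpos_length_le (xs : List Char) (k : Int) : (qpos xs k).length ≤ xs.length := by
  induction xs generalizing k with
  | nil => simp [qpos]
  | cons h t ih =>
    have := ih (k + 1)
    by_cases hq : h = '"' <;> simp [qpos, hq] <;> omega

theorem qpos_ge (xs : List Char) (k : Int) : ∀ m ∈ qpos xs k, k ≤ m := by
  induction xs generalizing k with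
  | nil => simp [qpos]
  | cons h t ih =>
    intro m hm
    by_cases hq : h = '"' <;> simp [qpos, hq] at hm
    · rcases hm with rfl | hm
      · exact le_refl m
      · have := ih (k + 1) m hm; omega
    · have := ih (k + 1) m hm; omega

-- find.go on a single-character needle returns the head of qpos (or -1)
theorem find_go_eq_qpos (xs : List Char) (k : Nat) :
    PySem.Chars.find.go ['"'] xs k = ((qpos xs (k : Int)).headD (-1)) := by
  induction xs generalizing k with
  | nil => simp [PySem.Chars.find.go, qpos]
  | cons h t ih =>
    by_cases hq : h = '"'
    · simp [PySem.Chars.find.go, List.isPrefixOf, hq, qpos]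
    · have hg : (['"'].isPrefixOf (h :: t)) = false := by
        simp [List.isPrefixOf]; exact Ne.symm hq
      simp only [PySem.Chars.find.go, hg, Bool.false_eq_true, if_false, qpos, hq]
      have hik := ih (k + 1)
      push_cast at hik
      exact hik

theorem find_eq_qpos (xs : List Char) :
    PySem.Chars.find xs ['"'] = (qpos xs 0).headD (-1) := by
  have := find_go_eq_qpos xs 0
  simpa [PySem.Chars.find] using this

-- s.find('"', k) returns the head of the quote positions at index ≥ k (or -1)
theorem findFrom_eq_qpos (cs : List Char) (k : Nat) (hk : k ≤ cs.length) :
    PySem.Chars.findFrom cs ['"'] (k : Int) none = (qpos (cs.drop k) (k : Int)).headD (-1) := by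
  rw [PySem.Chars.findFrom_natCast cs ['"'] k hk, find_eq_qpos]
  have hshift : qpos (cs.drop k) (k : Int) = (qpos (cs.drop k) 0).map (· + (k : Int)) := by
    simpa using qpos_shift (cs.drop k) 0 (k : Int)
  cases hq : qpos (cs.drop k) 0 with
  | nil => simp [hshift, hq]
  | cons a rest =>
    have ha : (0 : Int) ≤ a := qpos_ge (cs.drop k) 0 a (by simp [hq])
    have hne : a ≠ -1 := by omega
    simp [hshift, hq, hne]
    ring

-- the step shape of qpos: its head is a genuine quote position and the tail restarts after it
theorem qpos_step (xs : List Char) (k : Nat) (m : Int) (rest : List Int)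
    (h : qpos xs (k : Int) = m :: rest) :
    ∃ mn : Nat, m = (mn : Int) ∧ k ≤ mn ∧ mn - k < xs.length ∧
      xs[mn - k]? = some '"' ∧ rest = qpos (xs.drop (mn - k + 1)) ((mn : Int) + 1) := by
  induction xs generalizing k m rest with
  | nil => simp [qpos] at h
  | cons c t ih =>
    by_cases hq : c = '"'
    · simp [qpos, hq] at h
      exact ⟨k, h.1.symm, le_refl k, by simp, by simp [hq], by simpa using h.2.symm⟩
    · simp [qpos, hq] at h
      have h' : qpos t ((k + 1 : Nat) : Int) = m :: rest := by
        simpa [Int.natCast_add] using h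
      obtain ⟨mn, hm, hle, hlt, hget, hrest⟩ := ih (k + 1) m rest h'
      refine ⟨mn, hm, by omega, by simp only [List.length_cons]; omega, ?_, ?_⟩
      · have heq : mn - k = (mn - (k + 1)) + 1 := by omega
        simpa [heq] using hget
      · have heq : mn - k + 1 = (mn - (k + 1) + 1) + 1 := by omega
        simpa [heq] using hrest

-- the fold A's while loop performs over the successive quote positions
def pairFold : List Int → List Int → List (List Int) → List Int × List (List Int)
  | [], r, R => (r, R)
  | p :: ps, r, R =>
    let r' := r ++ [p]
    if r'.length = 2 then pairFold ps [] (R ++ [r']) else pairFold ps r' R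

theorem scanEsc_zero (cs : List Char) (j : Int) (h : PySem.List.pyGet? cs j = some '"') :
    ScanForHowManyEscapeBefore cs j = 0 := by
  unfold ScanForHowManyEscapeBefore
  simp [scanEscGo, h]

theorem scanLoop_eq_pairFold (cs : List Char) (k : Nat) (fuel : Nat)
    (hk : k ≤ cs.length) (hfuel : (qpos (cs.drop k) (k : Int)).length < fuel)
    (r : List Int) (R : List (List Int)) :
    scanLoop cs ((qpos (cs.drop k) (k : Int)).headD (-1)) r R fuel =
      pairFold (qpos (cs.drop k) (k : Int)) r R := by
  induction fuel generalizing k r R with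
  | zero => omega
  | succ f ih =>
    cases hq : qpos (cs.drop k) (k : Int) with
    | nil => simp [scanLoop, pairFold]
    | cons m rest =>
      obtain ⟨mn, hm, hle, hlt, hget, hrest⟩ := qpos_step (cs.drop k) k m rest hq
      have hmn_lt : mn < cs.length := by
        have := List.length_drop (i := k) (l := cs); omega
      have hget' : cs[mn]? = some '"' := by
        have hd := List.getElem?_drop (xs := cs) (i := k) (j := mn - k)
        rw [show k + (mn - k) = mn by omega] at hd
        rw [← hd]; exact hget
      have hpy : PySem.List.pyGet? cs m = some '"' := by
        rw [hm, PySem.List.pyGet?_natCast]; exact hget'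
      have hne : m ≠ -1 := by rw [hm]; omega
      have hdrop : (cs.drop k).drop (mn - k + 1) = cs.drop (mn + 1) := by
        rw [List.drop_drop]; congr 1; omega
      have hrest' : rest = qpos (cs.drop (mn + 1)) ((mn + 1 : Nat) : Int) := by
        rw [hrest, hdrop]; norm_cast
      have hfind : PySem.Chars.findFrom cs ['"'] (m + 1) none =
          (qpos (cs.drop (mn + 1)) ((mn + 1 : Nat) : Int)).headD (-1) := by
        have hff := findFrom_eq_qpos cs (mn + 1) (by omega)
        push_cast at hff
        rw [hm]
        exact hff
      have hesc : PySem.Int.mod (ScanForHowManyEscapeBefore cs m) 2 = 0 := by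
        rw [scanEsc_zero cs m hpy]; decide
      have hflen : (qpos (cs.drop (mn + 1)) ((mn + 1 : Nat) : Int)).length < f := by
        rw [← hrest']
        have := hfuel; rw [hq] at this
        simp only [List.length_cons] at this; omega
      have ihm := fun r R => ih (mn + 1) (by omega) hflen r R
      simp only [List.headD_cons, scanLoop, hne, ne_eq, not_false_eq_true,
        hesc, if_pos, hfind, pairFold]
      split
      · rw [ihm, hrest']
      · rw [ihm, hrest']

theorem pairFold_even (Q : List Int) (R : List (List Int)) (h : Q.length % 2 = 0) :
    pairFold Q [] R = ([], R ++ pyPairs Q) := by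
  induction Q using pyPairs.induct generalizing R with
  | case1 a b rest ih =>
    have hr : rest.length % 2 = 0 := by simp at h; omega
    have := ih (R ++ [[a, b]]) hr
    simp [pairFold, pyPairs, this]
  | case2 t h2 =>
    match t, h2 with
    | [], _ => simp [pairFold, pyPairs]
    | [a], _ => simp at h
    | a :: b :: r, h2 => exact (h2 a b r rfl).elim

theorem pairFold_odd (Q : List Int) (R : List (List Int)) (h : Q.length % 2 = 1) :
    (pairFold Q [] R).1 ≠ [] := by
  induction Q using pyPairs.induct generalizing R with
  | case1 a b rest ih =>
    have hr : rest.length % 2 = 1 := by simp at h; omega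
    simpa [pairFold] using ih _ hr
  | case2 t h2 =>
    match t, h2 with
    | [], _ => simp at h
    | [a], _ => simp [pairFold]
    | a :: b :: r, h2 => exact (h2 a b r rfl).elim

theorem positions_eq_qpos (cs : List Char) (s : Int) :
    (((PySem.List.enumerate cs s).filter (fun p => p.2 == '"')).map (·.1)) = qpos cs s := by
  induction cs generalizing s with
  | nil => simp [PySem.List.enumerate_nil, qpos]
  | cons h t ih =>
    by_cases hq : h = '"' <;>
      simp [PySem.List.enumerate_cons, hq, qpos, ih (s + 1)]

-- ===== VERDICT (by name: the statement is the Claim_ definition above) =====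
theorem ScanForQuotPair_spec : Claim_equal_ScanForQuotPair := by
  intro x _
  unfold Spec_ScanForQuotPair
  simp only [ScanForQuotPair, ScanForQuotPair_alt]
  have h0 : PySem.Chars.find x.toList ['"'] = (qpos x.toList 0).headD (-1) := find_eq_qpos _
  have hloop := scanLoop_eq_pairFold x.toList 0 (x.toList.length + 1) (by omega)
    (by simpa using Nat.lt_succ_of_le (qpos_length_le x.toList 0)) [] []
  simp only [List.drop_zero, Int.natCast_zero] at hloop
  rw [h0, hloop, positions_eq_qpos]
  by_cases hpar : (qpos x.toList 0).length % 2 = 0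
  · rw [pairFold_even _ _ hpar]
    simp
    intro hc
    exfalso
    omega
  · have hodd : (qpos x.toList 0).length % 2 = 1 := by omega
    have h1 := pairFold_odd (qpos x.toList 0) [] hodd
    have heq1 : PySem.Int.mod (PySem.List.len (qpos x.toList 0)) 2 = 1 := by
      rw [PySem.List.len_eq]
      rw [show PySem.Int.mod ((qpos x.toList 0).length : Int) 2 = (((qpos x.toList 0).length % 2 : Nat) : Int) from by exact_mod_cast PySem.Int.mod_natCast (qpos x.toList 0).length 2, hodd]
      simp
    simp only [heq1]
    cases hpf : pairFold (qpos x.toList 0) [] [] with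
    | mk r R =>
      rw [hpf] at h1
      simp only at h1
      simp [h1]
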